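-- pv_equiv track=rewrite | github.com/kapuerro333/hillel_2510 | homework_07.py | count_symbols_in_last_sentence
-- ===== SOURCE A (Python) =====
-- def count_symbols_in_last_sentence(text):
--     sentences = text.split(".")
--     filtered_sentences = [sentence.strip() for sentence in sentences if sentence.strip()]
--     if filtered_sentences:
--         last_sentence = filtered_sentences[-1]
--         return len(last_sentence)
--     else:
--         return 0
-- ===== SOURCE B (Python) =====
-- def count_symbols_in_last_sentence(text):
--     for piece in reversed(text.split(".")):
--         stripped = piece.strip()
--         if stripped:
--             return len(stripped)
--     return 0
-- ===== Notes on version B (the rewrite author's own statement) =====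
-- stated objective: simpler
-- what changed: Instead of building the full list of stripped non-empty pieces and indexing its last element, B scans the split pieces right-to-left and returns the length of the first non-empty stripped piece (early exit), 0 if none.
import Mathlib
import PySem

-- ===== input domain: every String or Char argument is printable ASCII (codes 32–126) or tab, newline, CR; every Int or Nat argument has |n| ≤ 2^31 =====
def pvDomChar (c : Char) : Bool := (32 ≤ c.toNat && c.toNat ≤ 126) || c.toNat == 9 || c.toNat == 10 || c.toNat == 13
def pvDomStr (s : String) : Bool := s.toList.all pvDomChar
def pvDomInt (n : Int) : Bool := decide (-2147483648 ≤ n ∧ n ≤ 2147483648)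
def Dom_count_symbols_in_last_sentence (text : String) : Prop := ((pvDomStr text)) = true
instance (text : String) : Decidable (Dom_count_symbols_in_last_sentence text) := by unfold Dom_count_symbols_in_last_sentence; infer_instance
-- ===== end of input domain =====

-- ===== PORT A =====
-- B replaces "build filtered list, take last" by a reverse scan with early exit; same value, same cost.
def count_symbols_in_last_sentence (text : String) : Int :=
  let sentences := ((PySem.Str.split? text ".").getD [])
  let filtered := (sentences.filter (fun s => !(PySem.Str.strip s == ""))).map PySem.Str.strip
  if filtered ≠ [] then
    match PySem.List.pyGet? filtered (-1) with
    | some last_sentence => PySem.Str.len last_sentence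
    | none => 0
  else 0

-- ===== PORT B =====
def pvRevScan : List String → Int
  | [] => 0
  | piece :: rest =>
      let stripped := PySem.Str.strip piece
      if stripped ≠ "" then PySem.Str.len stripped else pvRevScan rest

def count_symbols_in_last_sentence_alt (text : String) : Int :=
  pvRevScan (((PySem.Str.split? text ".").getD [])).reverse

-- ===== PRECONDITION & SPEC =====
def Spec_count_symbols_in_last_sentence (text : String) (out : Int) : Prop := out = count_symbols_in_last_sentence_alt text
instance (text : String) (out : Int) : Decidable (Spec_count_symbols_in_last_sentence text out) := by unfold Spec_count_symbols_in_last_sentence; infer_instance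

-- ===== CLAIM (what is proved, stated in full; the proofs are below) =====
def Claim_equal_count_symbols_in_last_sentence : Prop := ∀ (text : String), Dom_count_symbols_in_last_sentence text → Spec_count_symbols_in_last_sentence text (count_symbols_in_last_sentence text)

-- ===== LEMMAS AND PROOFS =====

-- ===== VERDICT (by name: the statement is the Claim_ definition above) =====
lemma pvRevScan_filter (r : List String) :
    pvRevScan r = match r.filter (fun s => !(PySem.Str.strip s == "")) with
      | [] => 0
      | s :: _ => PySem.Str.len (PySem.Str.strip s) := by
  induction r with
  | nil => rfl
  | cons p rest ih =>
      by_cases h : PySem.Str.strip p = ""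
      · simp [pvRevScan, h, ih]
      · simp [pvRevScan, h]

theorem count_symbols_in_last_sentence_spec : Claim_equal_count_symbols_in_last_sentence := by
  intro text _
  unfold Spec_count_symbols_in_last_sentence count_symbols_in_last_sentence
    count_symbols_in_last_sentence_alt
  dsimp only
  rw [pvRevScan_filter, List.filter_reverse]
  generalize (((PySem.Str.split? text ".").getD [])).filter
      (fun s => !(PySem.Str.strip s == "")) = fl
  rcases List.eq_nil_or_concat fl with h | ⟨ys, y, h⟩ <;> subst h
  · simp
  · simp
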